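-- pv_equiv track=rewrite | github.com/0xnu11byte/AES-Optimization-Study | sbox/compact_new.py | affine_transform
-- ===== SOURCE A (Python) =====
-- def affine_transform(byte, c=0x63):
--     result = 0
--     for i in range(8):
--         bit = (byte >> i) & 1
--         total = bit ^ ((byte >> ((i + 4) % 8)) & 1) ^ ((byte >> ((i + 5) % 8)) & 1) ^ \
--                 ((byte >> ((i + 6) % 8)) & 1) ^ ((byte >> ((i + 7) % 8)) & 1) ^ ((c >> i) & 1)
--         result |= (total << i)
--     return result
-- ===== SOURCE B (Python) =====
-- def affine_transform(byte, c=0x63):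
--     # closed-form word-level formula: XOR of rotated copies of the low byte
--     def rotl(v, k):
--         return ((v << k) | (v >> (8 - k))) & 0xFF
--     b = byte & 0xFF
--     return b ^ rotl(b, 1) ^ rotl(b, 2) ^ rotl(b, 3) ^ rotl(b, 4) ^ (c & 0xFF)
-- ===== Notes on version B (the rewrite author's own statement) =====
-- stated objective: alternative
-- what changed: Replaces the per-output-bit loop (extracting and XOR-ing six individual bits for each of the 8 positions) by the closed-form word-level formula b ^ rotl(b,1) ^ rotl(b,2) ^ rotl(b,3) ^ rotl(b,4) ^ (c & 0xFF) computed on the whole masked byte at once.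
import Mathlib
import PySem

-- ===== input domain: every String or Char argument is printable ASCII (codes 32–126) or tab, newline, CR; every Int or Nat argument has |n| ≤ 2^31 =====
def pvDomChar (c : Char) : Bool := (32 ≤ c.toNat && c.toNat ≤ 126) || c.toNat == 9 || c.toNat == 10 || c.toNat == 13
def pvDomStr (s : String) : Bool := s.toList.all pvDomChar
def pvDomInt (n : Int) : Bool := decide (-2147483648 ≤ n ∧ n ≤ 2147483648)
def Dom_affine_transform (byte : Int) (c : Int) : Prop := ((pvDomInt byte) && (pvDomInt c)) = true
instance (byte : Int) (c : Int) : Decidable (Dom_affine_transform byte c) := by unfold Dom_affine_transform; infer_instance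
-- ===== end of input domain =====

-- B replaces A's per-output-bit loop by the closed-form word-level formula
-- b ^ rotl(b,1) ^ rotl(b,2) ^ rotl(b,3) ^ rotl(b,4) ^ (c & 0xFF) on the low byte b = byte & 0xFF.

-- ===== PORT A =====
def affine_transform (byte : Int) (c : Int) : Int :=
  (List.range 8).foldl (fun result i =>
    let bit := PySem.Int.band (byte >>> i) 1
    let total := PySem.Int.bxor (PySem.Int.bxor (PySem.Int.bxor (PySem.Int.bxor (PySem.Int.bxor
      bit (PySem.Int.band (byte >>> ((i + 4) % 8)) 1)) (PySem.Int.band (byte >>> ((i + 5) % 8)) 1))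
      (PySem.Int.band (byte >>> ((i + 6) % 8)) 1)) (PySem.Int.band (byte >>> ((i + 7) % 8)) 1))
      (PySem.Int.band (c >>> i) 1)
    PySem.Int.bor result (total <<< i)) 0

-- ===== PORT B =====
def rotl8 (v : Int) (k : Nat) : Int :=
  PySem.Int.band (PySem.Int.bor (v <<< k) (v >>> (8 - k))) 255

def affine_transform_alt (byte : Int) (c : Int) : Int :=
  let b := PySem.Int.band byte 255
  PySem.Int.bxor (PySem.Int.bxor (PySem.Int.bxor (PySem.Int.bxor (PySem.Int.bxor
    b (rotl8 b 1)) (rotl8 b 2)) (rotl8 b 3)) (rotl8 b 4)) (PySem.Int.band c 255)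

-- ===== PRECONDITION & SPEC =====
def Spec_affine_transform (byte : Int) (c : Int) (out : Int) : Prop := out = affine_transform_alt byte c
instance (byte : Int) (c : Int) (out : Int) : Decidable (Spec_affine_transform byte c out) := by unfold Spec_affine_transform; infer_instance

-- ===== CLAIM (what is proved, stated in full; the proofs are below) =====
def Claim_equal_affine_transform : Prop := ∀ (byte : Int) (c : Int), Dom_affine_transform byte c → Spec_affine_transform byte c (affine_transform byte c)

-- ===== LEMMAS AND PROOFS =====

-- Nat-level straight-line images of the two ports, evaluated on the reduced low bytes.
def bitA (r s i : Nat) : Nat :=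
  ((r >>> i) &&& 1) ^^^ ((r >>> ((i+4)%8)) &&& 1) ^^^ ((r >>> ((i+5)%8)) &&& 1) ^^^
  ((r >>> ((i+6)%8)) &&& 1) ^^^ ((r >>> ((i+7)%8)) &&& 1) ^^^ ((s >>> i) &&& 1)

def lineA (r s : Nat) : Nat :=
  0 ||| (bitA r s 0 <<< 0) ||| (bitA r s 1 <<< 1) ||| (bitA r s 2 <<< 2) ||| (bitA r s 3 <<< 3)
    ||| (bitA r s 4 <<< 4) ||| (bitA r s 5 <<< 5) ||| (bitA r s 6 <<< 6) ||| (bitA r s 7 <<< 7)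

def natRotl (v k : Nat) : Nat := ((v <<< k) ||| (v >>> (8-k))) % 256

def lineB (r s : Nat) : Nat :=
  r ^^^ natRotl r 1 ^^^ natRotl r 2 ^^^ natRotl r 3 ^^^ natRotl r 4 ^^^ s

-- The finite check: the two straight-line Nat forms agree on every pair of bytes.
set_option maxRecDepth 10000 in
set_option maxHeartbeats 4000000 in
theorem line_eq :
    ((List.range 256).all fun r => (List.range 256).all fun s => lineA r s == lineB r s) = true := by
  decide

lemma shiftIR (x : Int) (k : Nat) : x >>> (k : Int) = x >>> k := by
  cases x
  · exact (Int.shiftRight_natCast _ k).trans rfl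
  · exact (Int.shiftRight_negSucc _ k).trans rfl

-- A bit of x below position 8 only depends on x mod 256.
lemma bandbit (x : Int) (k : Nat) (hk : k < 8) :
    PySem.Int.band (x >>> k) 1 = ((((x % 256).toNat >>> k) &&& 1 : Nat) : Int) := by
  rw [PySem.Int.band_one, PySem.Int.mod_eq_emod_of_pos (by norm_num),
      Int.shiftRight_eq_div_pow, Nat.shiftRight_eq_div_pow, Nat.and_one_is_mod]
  have h0 : (0:Int) ≤ x % 256 := Int.emod_nonneg x (by norm_num)
  have ht : ((x % 256).toNat : Int) = x % 256 := Int.toNat_of_nonneg h0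
  push_cast
  rw [ht]
  interval_cases k <;> omega

lemma bandbitC (x k : Int) (h1 : 0 ≤ k) (h2 : k < 8) :
    PySem.Int.band (x >>> k) 1 = ((((x % 256).toNat >>> k.toNat) &&& 1 : Nat) : Int) := by
  have : x >>> k = x >>> ((k.toNat : Nat) : Int) := by rw [Int.toNat_of_nonneg h1]
  rw [this, shiftIR]
  exact bandbit x k.toNat (by omega)

lemma castShiftL (n : Nat) (k : Int) (h : 0 ≤ k) : ((n:Nat):Int) <<< k = ((n <<< k.toNat : Nat) : Int) := by
  have : ((n:Nat):Int) <<< k = ((n:Nat):Int) <<< ((k.toNat : Nat) : Int) := by rw [Int.toNat_of_nonneg h]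
  rw [this, Int.shiftLeft_natCast]

lemma zero_bor (x : Int) : PySem.Int.bor 0 x = x := by
  rw [PySem.Int.bor_comm]; exact PySem.Int.bor_zero x

-- Python's x & 255 is x mod 256 (also for negative x).
lemma band255 (x : Int) : PySem.Int.band x 255 = x % 256 := by
  by_cases h : 0 ≤ x
  · simp only [PySem.Int.band, h, if_pos]
    norm_num
    simp only [show Int.toNat 255 = 255 from rfl]
    rw [show (255:Nat) = 2^8 - 1 from rfl, Nat.and_two_pow_sub_one_eq_mod]
    have := Int.toNat_of_nonneg h
    push_cast
    omega
  · simp only [PySem.Int.band]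
    norm_num [h]
    have hand : ((-x).toNat - 1) &&& 255 = ((-x).toNat - 1) % 256 :=
      Nat.and_two_pow_sub_one_eq_mod ((-x).toNat - 1) 8
    rw [Nat.and_comm] at hand
    simp only [show Int.toNat 255 = 255 from rfl]
    rw [hand]
    have hx : ((-x).toNat : Int) = -x := Int.toNat_of_nonneg (by omega)
    have h1 : 1 ≤ (-x).toNat := by omega
    have hm : ((-x).toNat - 1) % 256 < 256 := Nat.mod_lt _ (by norm_num)
    omega

lemma A_eq (byte c : Int) :
    affine_transform byte c = ((lineA (byte % 256).toNat (c % 256).toNat : Nat) : Int) := by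
  simp only [affine_transform, show List.range 8 = [0, 1, 2, 3, 4, 5, 6, 7] from rfl]
  norm_num
  rw [bandbitC byte 0 (by norm_num) (by norm_num), bandbitC c 0 (by norm_num) (by norm_num),
      bandbitC byte 1 (by norm_num) (by norm_num), bandbitC byte 2 (by norm_num) (by norm_num),
      bandbitC byte 3 (by norm_num) (by norm_num), bandbitC byte 4 (by norm_num) (by norm_num),
      bandbitC byte 5 (by norm_num) (by norm_num), bandbitC byte 6 (by norm_num) (by norm_num),
      bandbitC byte 7 (by norm_num) (by norm_num),
      bandbitC c 1 (by norm_num) (by norm_num), bandbitC c 2 (by norm_num) (by norm_num),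
      bandbitC c 3 (by norm_num) (by norm_num), bandbitC c 4 (by norm_num) (by norm_num),
      bandbitC c 5 (by norm_num) (by norm_num), bandbitC c 6 (by norm_num) (by norm_num),
      bandbitC c 7 (by norm_num) (by norm_num)]
  simp only [PySem.Int.bxor_natCast]
  rw [castShiftL _ 0 (by norm_num), castShiftL _ 1 (by norm_num), castShiftL _ 2 (by norm_num),
      castShiftL _ 3 (by norm_num), castShiftL _ 4 (by norm_num), castShiftL _ 5 (by norm_num),
      castShiftL _ 6 (by norm_num), castShiftL _ 7 (by norm_num)]
  simp only [PySem.Int.bor_natCast, zero_bor]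
  norm_cast
  simp [lineA, bitA]

lemma B_eq (byte c : Int) :
    affine_transform_alt byte c = ((lineB (byte % 256).toNat (c % 256).toNat : Nat) : Int) := by
  have h0b : (0:Int) ≤ byte % 256 := Int.emod_nonneg byte (by norm_num)
  have h0c : (0:Int) ≤ c % 256 := Int.emod_nonneg c (by norm_num)
  have hb : PySem.Int.band byte 255 = (((byte % 256).toNat : Nat) : Int) := by
    rw [band255, Int.toNat_of_nonneg h0b]
  have hc : PySem.Int.band c 255 = (((c % 256).toNat : Nat) : Int) := by
    rw [band255, Int.toNat_of_nonneg h0c]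
  simp only [affine_transform_alt, rotl8, hb, hc, lineB, natRotl,
    ← Int.natCast_shiftLeft, ← Int.natCast_shiftRight, PySem.Int.bor_natCast, band255]
  norm_cast

lemma line_eq' (r s : Nat) (hr : r < 256) (hs : s < 256) : lineA r s = lineB r s := by
  have h := line_eq
  rw [List.all_eq_true] at h
  have h1 := h r (List.mem_range.mpr hr)
  rw [List.all_eq_true] at h1
  simpa using h1 s (List.mem_range.mpr hs)

-- ===== VERDICT (by name: the statement is the Claim_ definition above) =====
theorem affine_transform_spec : Claim_equal_affine_transform := by
  intro byte c _
  unfold Spec_affine_transform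
  rw [A_eq, B_eq, line_eq' _ _
    (by have := Int.emod_lt_of_pos byte (show (0:Int) < 256 by norm_num); omega)
    (by have := Int.emod_lt_of_pos c (show (0:Int) < 256 by norm_num); omega)]
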